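-- pv_equiv track=rewrite | github.com/cipher982/ai-tools-website | ai_tools_website/v1/seo_utils.py | _truncate_slug
-- ===== SOURCE A (Python) =====
-- from typing import List
--
-- def _truncate_slug(parts: List[str], max_length: int) -> str:
--     """Truncate slug parts to max length while preserving whole tokens where possible."""
--     if not parts:
--         return ""
--
--     truncated: List[str] = []
--     total_length = 0
--
--     for part in parts:
--         part_length = len(part)
--         separator = 1 if truncated else 0
--         if total_length + separator + part_length > max_length:
--             break
--         truncated.append(part)
--         total_length += separator + part_length
--
--     if truncated:
--         return "-".join(truncated)
--
--     # Fallback to hard trim if nothing fits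
--     raw = "-".join(parts)
--     return raw[:max_length].strip("-")
-- ===== SOURCE B (Python) =====
-- from typing import List
--
--
-- def _truncate_slug(parts: List[str], max_length: int) -> str:
--     """Truncate slug parts to max length while preserving whole tokens where possible.
--
--     Builds the (nondecreasing) table of joined-prefix widths, then binary-searches
--     it for the largest whole-token prefix count that fits the limit."""
--     if not parts:
--         return ""
--
--     # widths[i] = len("-".join(parts[:i+1])); nondecreasing, so fitting is a prefix
--     widths: List[int] = []
--     for part in parts:
--         widths.append((widths[-1] + 1 if widths else 0) + len(part))
--
--     lo, hi, best = 1, len(parts), 0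
--     while lo <= hi:
--         mid = (lo + hi) // 2
--         if widths[mid - 1] <= max_length:
--             best, lo = mid, mid + 1
--         else:
--             hi = mid - 1
--
--     if best:
--         return "-".join(parts[:best])
--
--     # Fallback to hard trim if nothing fits
--     return "-".join(parts)[:max_length].strip("-")
-- ===== Notes on version B (the rewrite author's own statement) =====
-- stated objective: alternative
-- what changed: A greedily accumulates tokens in one loop and breaks at the first overflow; B instead builds the nondecreasing table of joined-prefix widths and then BINARY-SEARCHES it for the largest fitting prefix count (correct because widths are monotone, so the fitting prefixes are downward closed), joining parts[:best] once at the end.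
import Mathlib
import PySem

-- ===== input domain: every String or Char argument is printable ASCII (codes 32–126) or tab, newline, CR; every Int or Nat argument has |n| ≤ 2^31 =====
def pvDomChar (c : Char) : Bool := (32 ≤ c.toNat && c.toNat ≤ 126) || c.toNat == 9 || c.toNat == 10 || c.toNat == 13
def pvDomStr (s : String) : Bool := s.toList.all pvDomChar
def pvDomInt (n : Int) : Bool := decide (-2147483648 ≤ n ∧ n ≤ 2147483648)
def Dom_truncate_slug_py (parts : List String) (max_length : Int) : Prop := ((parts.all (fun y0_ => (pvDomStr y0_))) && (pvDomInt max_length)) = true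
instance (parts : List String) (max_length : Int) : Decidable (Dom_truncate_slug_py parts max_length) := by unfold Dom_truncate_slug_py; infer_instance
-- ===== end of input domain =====

-- B replaces A's greedy accumulate-and-break loop by a monotone width table plus a
-- binary search for the largest fitting prefix count (alternative decomposition).


-- ===== PORT A =====
-- A's 'for part in parts: … break' loop, carrying the growing list and running total
def pvLoopA (max_length : Int) : List String → List String → Int → List String
  | [], truncated, _ => truncated
  | part :: rest, truncated, total =>
    if total + (if truncated ≠ [] then 1 else 0) + PySem.Str.len part > max_length then truncated
    else pvLoopA max_length rest (truncated ++ [part])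
           (total + (if truncated ≠ [] then 1 else 0) + PySem.Str.len part)

def truncate_slug_py (parts : List String) (max_length : Int) : String :=
  if parts = [] then ""
  else
    let truncated := pvLoopA max_length parts [] 0
    if truncated ≠ [] then PySem.Str.join "-" truncated
    else
      let raw := PySem.Str.join "-" parts
      PySem.Str.stripChars (PySem.Str.slice raw none (some max_length)) "-"

-- ===== PORT B =====
-- B's table-building loop: widths.append((widths[-1] + 1 if widths else 0) + len(part))
def pvWidths (parts : List String) : List Int :=
  parts.foldl
    (fun ws part =>
      ws ++ [(if ws ≠ [] then PySem.List.pyGetD ws (-1) 0 + 1 else 0) + PySem.Str.len part]) []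

-- B's 'while lo <= hi' binary search (mid inlined, fuel = one more than the interval
-- width, which shrinks every iteration, so the 0-fuel branch is never taken);
-- widths[mid-1] is provably in range (1 ≤ lo ≤ mid ≤ hi ≤ len(widths))
def pvBS (w : List Int) (ml : Int) : Nat → Int → Int → Int → Int
  | 0, _, _, best => best
  | fuel + 1, lo, hi, best =>
    if lo ≤ hi then
      if PySem.List.pyGetD w (PySem.Int.floordiv (lo + hi) 2 - 1) 0 ≤ ml then
        pvBS w ml fuel (PySem.Int.floordiv (lo + hi) 2 + 1) hi (PySem.Int.floordiv (lo + hi) 2)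
      else pvBS w ml fuel lo (PySem.Int.floordiv (lo + hi) 2 - 1) best
    else best

def truncate_slug_py_alt (parts : List String) (max_length : Int) : String :=
  if parts = [] then ""
  else
    let widths := pvWidths parts
    let best := pvBS widths max_length (parts.length + 1) 1 (parts.length : Int) 0
    if best ≠ 0 then PySem.Str.join "-" (PySem.List.slice parts none (some best))
    else PySem.Str.stripChars (PySem.Str.slice (PySem.Str.join "-" parts) none (some max_length)) "-"

-- ===== PRECONDITION & SPEC =====
def Spec_truncate_slug_py (parts : List String) (max_length : Int) (out : String) : Prop := out = truncate_slug_py_alt parts max_length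
instance (parts : List String) (max_length : Int) (out : String) : Decidable (Spec_truncate_slug_py parts max_length out) := by unfold Spec_truncate_slug_py; infer_instance

-- ===== CLAIM (what is proved, stated in full; the proofs are below) =====
def Claim_equal_truncate_slug_py : Prop := ∀ (parts : List String) (max_length : Int), Dom_truncate_slug_py parts max_length → Spec_truncate_slug_py parts max_length (truncate_slug_py parts max_length)

-- ===== LEMMAS AND PROOFS =====

-- reference greedy count: how many leading parts A's loop keeps
def pvRun (max_length : Int) : List String → Int → Int → Nat
  | [], _, _ => 0
  | p :: ps, t, sep =>
    if t + sep + PySem.Str.len p > max_length then 0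
    else 1 + pvRun max_length ps (t + sep + PySem.Str.len p) 1

theorem pvLoopA_eq (max_length : Int) :
    ∀ (l acc : List String) (t : Int),
      pvLoopA max_length l acc t
        = acc ++ l.take (pvRun max_length l t (if acc = [] then 0 else 1)) := by
  intro l
  induction l with
  | nil => intro acc t; simp [pvLoopA, pvRun]
  | cons p ps ih =>
    intro acc t
    have hsep : (if acc ≠ [] then (1:Int) else 0) = (if acc = [] then 0 else 1) := by
      by_cases h : acc = [] <;> simp [h]
    simp only [pvLoopA, pvRun, hsep]
    by_cases hc : t + (if acc = [] then (0:Int) else 1) + PySem.Str.len p > max_length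
    · rw [if_pos hc, if_pos hc]; simp
    · rw [if_neg hc, if_neg hc, ih]
      rw [if_neg (by simp : ¬(acc ++ [p] = []))]
      rw [Nat.add_comm 1 _]
      simp [List.take_succ_cons]

-- the cumulative-width chain: a+1+x1, (a+1+x1)+1+x2, …
def pvChain : Int → List Int → List Int
  | _, [] => []
  | a, x :: xs => (a + 1 + x) :: pvChain (a + 1 + x) xs

theorem pvWidths_go (l : List String) :
    ∀ (ws : List Int) (x : Int),
      (l.foldl (fun ws part =>
          ws ++ [(if ws ≠ [] then PySem.List.pyGetD ws (-1) 0 + 1 else 0) + PySem.Str.len part])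
        (ws ++ [x]))
      = ws ++ [x] ++ pvChain x (l.map PySem.Str.len) := by
  induction l with
  | nil => intro ws x; simp [pvChain]
  | cons p ps ih =>
    intro ws x
    simp only [List.foldl_cons, List.map_cons, pvChain]
    rw [if_pos (by simp), PySem.List.pyGetD_neg_one_append_singleton]
    have h2 : ws ++ [x] ++ [x + 1 + PySem.Str.len p] = (ws ++ [x]) ++ [x + 1 + PySem.Str.len p] := by
      simp
    rw [h2, ih]
    simp

theorem pvWidths_cons (p : String) (ps : List String) :
    pvWidths (p :: ps) = PySem.Str.len p :: pvChain (PySem.Str.len p) (ps.map PySem.Str.len) := by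
  have h := pvWidths_go ps [] (PySem.Str.len p)
  simp only [List.nil_append] at h
  simp only [pvWidths, List.foldl_cons]
  simpa using h

theorem pvChain_len : ∀ (l : List Int) (a : Int), (pvChain a l).length = l.length := by
  intro l
  induction l with
  | nil => intro a; rfl
  | cons x xs ih => intro a; simp [pvChain, ih]

theorem pvChain_ge : ∀ (l : List Int), (∀ x ∈ l, 0 ≤ x) →
    ∀ (a y : Int), y ∈ pvChain a l → a ≤ y := by
  intro l
  induction l with
  | nil => intro _ a y hy; simp [pvChain] at hy
  | cons x xs ih =>
    intro hl a y hy
    have hx : 0 ≤ x := hl x (by simp)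
    rcases (by simpa [pvChain] using hy : y = a + 1 + x ∨ y ∈ pvChain (a + 1 + x) xs) with h | h
    · omega
    · have := ih (fun z hz => hl z (by simp [hz])) (a + 1 + x) y h
      omega

theorem pvChain_pairwise : ∀ (l : List Int), (∀ x ∈ l, 0 ≤ x) →
    ∀ a : Int, (a :: pvChain a l).Pairwise (· ≤ ·) := by
  intro l
  induction l with
  | nil => intro _ a; simp [pvChain]
  | cons x xs ih =>
    intro hl a
    have hx : 0 ≤ x := hl x (by simp)
    have htail := ih (fun z hz => hl z (by simp [hz])) (a + 1 + x)
    refine List.pairwise_cons.mpr ⟨?_, by simpa [pvChain] using htail⟩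
    intro y hy
    rcases (by simpa [pvChain] using hy : y = a + 1 + x ∨ y ∈ pvChain (a + 1 + x) xs) with h | h
    · omega
    · have := pvChain_ge xs (fun z hz => hl z (by simp [hz])) (a + 1 + x) y h
      omega

theorem pvSorted_getD_iff (ml : Int) :
    ∀ (w : List Int), w.Pairwise (· ≤ ·) →
      ∀ i : Nat, i < w.length →
        (w.getD i 0 ≤ ml ↔ i < (w.takeWhile (fun x => decide (x ≤ ml))).length) := by
  intro w
  induction w with
  | nil => intro _ i hi; simp at hi
  | cons x xs ih =>
    intro hs i hi
    rw [List.pairwise_cons] at hs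
    by_cases hx : x ≤ ml
    · rw [List.takeWhile_cons_of_pos (by simpa using hx)]
      cases i with
      | zero => simpa using hx
      | succ j =>
        simp only [List.getD_cons_succ, List.length_cons]
        rw [ih hs.2 j (by simpa using hi)]
        omega
    · rw [List.takeWhile_cons_of_neg (by simpa using hx)]
      cases i with
      | zero => simpa using hx
      | succ j =>
        simp only [List.getD_cons_succ, List.length_nil]
        constructor
        · intro h
          exfalso
          have hj : j < xs.length := by simpa using hi
          have hmem : xs.getD j 0 ∈ xs := by
            rw [List.getD_eq_getElem xs 0 hj]
            exact List.getElem_mem hj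
          have := hs.1 _ hmem
          omega
        · intro h; omega

-- the chain's takeWhile length is A's greedy count
theorem pvChain_takeWhile (max_length : Int) :
    ∀ (qs : List String) (t : Int),
      ((pvChain t (qs.map PySem.Str.len)).takeWhile (fun w => decide (w ≤ max_length))).length
        = pvRun max_length qs t 1 := by
  intro qs
  induction qs with
  | nil => intro t; simp [pvChain, pvRun]
  | cons q qs ih =>
    intro t
    simp only [List.map_cons, pvChain, pvRun]
    by_cases h : t + 1 + PySem.Str.len q ≤ max_length
    · rw [List.takeWhile_cons_of_pos (by simpa using h)]
      rw [if_neg (by omega)]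
      simp only [List.length_cons, ih]
      omega
    · rw [List.takeWhile_cons_of_neg (by simpa using h)]
      rw [if_pos (by omega)]
      rfl

theorem pvWidths_takeWhile (max_length : Int) (p : String) (ps : List String) :
    ((pvWidths (p :: ps)).takeWhile (fun w => decide (w ≤ max_length))).length
      = pvRun max_length (p :: ps) 0 0 := by
  rw [pvWidths_cons]
  simp only [pvRun]
  by_cases h : PySem.Str.len p ≤ max_length
  · rw [List.takeWhile_cons_of_pos (by simpa using h)]
    rw [if_neg (by omega)]
    simp only [List.length_cons, pvChain_takeWhile]
    have h0 : (0:Int) + 0 + PySem.Str.len p = PySem.Str.len p := by ring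
    rw [h0]
    omega
  · rw [List.takeWhile_cons_of_neg (by simpa using h)]
    rw [if_pos (by omega)]
    rfl

-- binary-search correctness on a table whose fitting prefixes are downward closed
theorem pvBS_eq (w : List Int) (ml : Int) (t : Nat)
    (hP : ∀ k : Nat, 1 ≤ k → k ≤ w.length →
      (PySem.List.pyGetD w ((k : Int) - 1) 0 ≤ ml ↔ k ≤ t)) :
    ∀ fuel : Nat, ∀ lo hi best : Int, (hi + 1 - lo).toNat ≤ fuel →
      1 ≤ lo → hi ≤ (w.length : Int) → (t : Int) ≤ hi → best = min (lo - 1) (t : Int) →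
      pvBS w ml fuel lo hi best = (t : Int) := by
  intro fuel
  induction fuel with
  | zero =>
    intro lo hi best hN h1 h2 h3 h4
    simp only [pvBS]
    omega
  | succ n ih =>
    intro lo hi best hN h1 h2 h3 h4
    simp only [pvBS]
    by_cases hlh : lo ≤ hi
    · rw [if_pos hlh]
      have hmid := PySem.Int.floordiv_two_mid_bounds hlh
      have h1m : 1 ≤ PySem.Int.floordiv (lo + hi) 2 := by omega
      have hk : ((PySem.Int.floordiv (lo + hi) 2).toNat : Int) = PySem.Int.floordiv (lo + hi) 2 :=
        Int.toNat_of_nonneg (by omega)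
      have hPk := hP (PySem.Int.floordiv (lo + hi) 2).toNat (by omega) (by omega)
      rw [hk] at hPk
      by_cases hc : PySem.List.pyGetD w (PySem.Int.floordiv (lo + hi) 2 - 1) 0 ≤ ml
      · rw [if_pos hc]
        have hmt := hPk.mp hc
        exact ih _ _ _ (by omega) (by omega) h2 h3 (by omega)
      · rw [if_neg hc]
        have hmt : (t : Int) < PySem.Int.floordiv (lo + hi) 2 := by
          by_contra hh
          exact hc (hPk.mpr (by omega))
        exact ih _ _ _ (by omega) h1 (by omega) (by omega) h4
    · rw [if_neg hlh]
      omega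

-- ===== VERDICT (by name: the statement is the Claim_ definition above) =====
theorem truncate_slug_py_spec : Claim_equal_truncate_slug_py := by
  intro parts max_length _hd
  unfold Spec_truncate_slug_py truncate_slug_py truncate_slug_py_alt
  match parts with
  | [] => rfl
  | p :: ps =>
    simp only [if_neg (List.cons_ne_nil p ps)]
    rw [pvLoopA_eq]
    set w := pvWidths (p :: ps) with hwdef
    set t := pvRun max_length (p :: ps) 0 0 with htdef
    have hlen : w.length = ps.length + 1 := by
      rw [hwdef, pvWidths_cons]
      simp [pvChain_len]
    have hsorted : w.Pairwise (· ≤ ·) := by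
      rw [hwdef, pvWidths_cons]
      exact pvChain_pairwise (ps.map PySem.Str.len)
        (by intro x hx; rcases List.mem_map.mp hx with ⟨s, _, rfl⟩; simp [PySem.Str.len_eq])
        (PySem.Str.len p)
    have htw : (w.takeWhile (fun x => decide (x ≤ max_length))).length = t := by
      rw [hwdef, htdef]; exact pvWidths_takeWhile max_length p ps
    have ht_le : t ≤ w.length := by
      rw [← htw]; exact (List.takeWhile_sublist _).length_le
    have hP : ∀ k : Nat, 1 ≤ k → k ≤ w.length →
        (PySem.List.pyGetD w ((k : Int) - 1) 0 ≤ max_length ↔ k ≤ t) := by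
      intro k hk1 hk2
      have hc : ((k : Int) - 1) = ((k - 1 : Nat) : Int) := by omega
      rw [hc, PySem.List.pyGetD_natCast]
      rw [pvSorted_getD_iff max_length w hsorted (k - 1) (by omega), htw]
      omega
    have hbs : pvBS w max_length ((p :: ps).length + 1) 1 ((p :: ps).length : Int) 0 = (t : Int) := by
      exact pvBS_eq w max_length t hP ((p :: ps).length + 1) 1 _ 0
        (by simp) (by omega) (by simp [hlen]) (by simp [hlen] at ht_le ⊢; omega) (by omega)
    rw [hbs]
    have hsep0 : (if ([]:List String) = [] then (0:Int) else 1) = 0 := rfl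
    rw [hsep0]
    simp only [List.nil_append, ← htdef]
    by_cases h : t = 0
    · rw [h]
      simp
    · have hne : (p :: ps).take t ≠ [] := by
        apply List.ne_nil_of_length_pos
        rw [List.length_take]
        simp only [List.length_cons]
        omega
      rw [if_pos hne, if_pos (by exact_mod_cast h : ((t : Nat) : Int) ≠ 0)]
      rw [PySem.List.slice_to_natCast]
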